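-- pv_equiv track=rewrite | github.com/AkkilMG/SOSC-App-Dev | Harshith-N/No_vowels.py | replace_first_vowel
-- ===== SOURCE A (Python) =====
-- def replace_first_vowel(string):
--     vowels = {'a', 'e', 'i', 'o', 'u'}
--     vowel_index = []
--
--     for i in range(len(string)):
--         if string[i].lower() in vowels:
--             vowel_index.append(i)
--             break
--
--     if vowel_index:
--         index = vowel_index[0]
--         new_string = string[:index] + '-' + string[index+1:]
--     else:
--         new_string = string
--
--     return new_string
-- ===== SOURCE B (Python) =====
-- def replace_first_vowel(string):
--     # For each vowel letter (both cases), find its first occurrence; the first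
--     # vowel of the string is the minimum of the successful finds.
--     hits = [i for i in (string.find(v) for v in "aeiouAEIOU") if i != -1]
--     if not hits:
--         return string
--     index = min(hits)
--     return string[:index] + '-' + string[index + 1:]
-- ===== Notes on version B (the rewrite author's own statement) =====
-- stated objective: faster
-- what changed: Replaces A's per-character index loop (lowercasing each character and testing set membership) by ten C-implemented str.find calls, one per vowel letter of both cases, keeping the non -1 results and taking their minimum as the first-vowel index.
import Mathlib
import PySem

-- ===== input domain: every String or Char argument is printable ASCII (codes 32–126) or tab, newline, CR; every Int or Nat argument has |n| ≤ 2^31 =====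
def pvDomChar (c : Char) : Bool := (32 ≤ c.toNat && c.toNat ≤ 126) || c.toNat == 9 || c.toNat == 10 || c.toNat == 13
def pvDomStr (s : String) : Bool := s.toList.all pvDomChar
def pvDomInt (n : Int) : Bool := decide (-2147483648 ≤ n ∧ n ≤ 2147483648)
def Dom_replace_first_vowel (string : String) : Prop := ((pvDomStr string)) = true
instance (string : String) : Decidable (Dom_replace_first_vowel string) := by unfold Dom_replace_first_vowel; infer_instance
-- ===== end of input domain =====

-- B replaces A's early-break per-character index scan by one str.find per vowel letter plus a min aggregate (same O(n), measurably faster in CPython).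

-- ===== PORT A =====
-- Python: vowels = {'a','e','i','o','u'}. string[i] is a one-character string, so the
-- set of one-character strings is represented by its list of Chars and
-- string[i].lower() by PySem.Chars.lowerChar (exact: Str.lower maps lowerChar charwise).
def vowelsA : List Char := ['a', 'e', 'i', 'o', 'u']

-- the 'for i in range(len(string)): … break' loop; appending i and breaking = returning [i]
def loopA (s : List Char) : List Int → List Int
  | [] => []
  | i :: rest =>
    match PySem.List.pyGet? s i with
    | none => []   -- unreachable: i ranges over range(len(string))
    | some c => if PySem.Chars.lowerChar c ∈ vowelsA then [i] else loopA s rest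

def replace_first_vowel (string : String) : String :=
  let vowel_index := loopA string.toList (PySem.List.pyRange 0 (string.toList.length : Int) 1)
  match vowel_index with
  | [] => string
  | index :: _ =>
      PySem.Str.slice string none (some index) ++ "-" ++ PySem.Str.slice string (some (index + 1)) none

-- ===== PORT B =====
def replace_first_vowel_alt (string : String) : String :=
  let hits := (("aeiouAEIOU".toList).map
      (fun v => PySem.Chars.find string.toList [v])).filter (fun i => i ≠ -1)
  match PySem.List.min? hits (fun x => x) with
  | none => string
  | some index =>
      PySem.Str.slice string none (some index) ++ "-" ++ PySem.Str.slice string (some (index + 1)) none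

-- ===== PRECONDITION & SPEC =====
def Spec_replace_first_vowel (string : String) (out : String) : Prop := out = replace_first_vowel_alt string
instance (string : String) (out : String) : Decidable (Spec_replace_first_vowel string out) := by unfold Spec_replace_first_vowel; infer_instance

-- ===== CLAIM (what is proved, stated in full; the proofs are below) =====
def Claim_equal_replace_first_vowel : Prop := ∀ (string : String), Dom_replace_first_vowel string → Spec_replace_first_vowel string (replace_first_vowel string)

-- ===== LEMMAS AND PROOFS =====

-- the common predicate: the character is a vowel letter of either case
def pvIsV (c : Char) : Bool := c ∈ (['a','e','i','o','u','A','E','I','O','U'] : List Char)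

lemma char_eq_iff (a b : Char) : a = b ↔ a.toNat = b.toNat :=
  ⟨fun h => by rw [h], fun h => Char.ext (UInt32.toNat_inj.mp h)⟩

-- A's per-character test agrees with pvIsV on every Char (lowerChar only moves 'A'..'Z')
lemma lowerChar_mem_iff (c : Char) :
    (PySem.Chars.lowerChar c ∈ vowelsA) ↔ pvIsV c = true := by
  unfold PySem.Chars.lowerChar PySem.Chars.isupper vowelsA pvIsV
  by_cases h : ('A' ≤ c ∧ c ≤ 'Z')
  · have h1 : 65 ≤ c.toNat := h.1
    have h2 : c.toNat ≤ 90 := h.2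
    have hv : Nat.isValidChar (c.toNat + 32) := Or.inl (by omega)
    have hval : (Char.ofNat (c.toNat + 32)).toNat = c.toNat + 32 := by
      rw [Char.toNat_ofNat, if_pos hv]
    simp only [h.1, h.2, decide_true, Bool.and_self, if_true, List.mem_cons,
      List.not_mem_nil, or_false, decide_eq_true_eq, char_eq_iff, hval,
      show ('a').toNat = 97 from rfl, show ('e').toNat = 101 from rfl,
      show ('i').toNat = 105 from rfl, show ('o').toNat = 111 from rfl,
      show ('u').toNat = 117 from rfl, show ('A').toNat = 65 from rfl,
      show ('E').toNat = 69 from rfl, show ('I').toNat = 73 from rfl,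
      show ('O').toNat = 79 from rfl, show ('U').toNat = 85 from rfl]
    omega
  · have hif : (decide ('A' ≤ c) && decide (c ≤ 'Z')) = false := by
      rcases not_and_or.mp h with h' | h' <;> simp [h']
    rw [hif]
    have hA : ¬ (65 ≤ c.toNat ∧ c.toNat ≤ 90) := fun hc => h ⟨hc.1, hc.2⟩
    simp only [Bool.false_eq_true, if_false, List.mem_cons,
      List.not_mem_nil, or_false, decide_eq_true_eq, char_eq_iff,
      show ('a').toNat = 97 from rfl, show ('e').toNat = 101 from rfl,
      show ('i').toNat = 105 from rfl, show ('o').toNat = 111 from rfl,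
      show ('u').toNat = 117 from rfl, show ('A').toNat = 65 from rfl,
      show ('E').toNat = 69 from rfl, show ('I').toNat = 73 from rfl,
      show ('O').toNat = 79 from rfl, show ('U').toNat = 85 from rfl]
    omega

lemma prefix_singleton_iff (v : Char) (s : List Char) : [v] <+: s ↔ s.head? = some v := by
  cases s with
  | nil => simp
  | cons a t => simp [List.cons_prefix_cons, eq_comm]

-- find with a single-character needle is findIdx? of equality with that character
lemma find_singleton (s : List Char) (v : Char) :
    PySem.Chars.find s [v] =
      (match List.findIdx? (fun c => c = v) s with
       | none => -1
       | some k => (k : Int)) := by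
  cases hf : List.findIdx? (fun c => c = v) s with
  | none =>
    rw [List.findIdx?_eq_none_iff] at hf
    simp only []
    rw [PySem.Chars.find_eq_neg_one_iff]
    intro hinf
    have hv : v ∈ s := (List.singleton_infix_iff v s).mp hinf
    have := hf v hv
    simp at this
  | some k =>
    rcases List.findIdx?_eq_some_iff_getElem.mp hf with ⟨hk, hpk, hmin⟩
    have hmem : v ∈ s := by
      have : s[k] = v := by simpa using hpk
      exact this ▸ List.getElem_mem hk
    have hnn : 0 ≤ PySem.Chars.find s [v] :=
      (PySem.Chars.find_nonneg_iff s [v]).mpr ((List.singleton_infix_iff v s).mpr hmem)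
    obtain ⟨hpre, hfirst⟩ := PySem.Chars.find_spec hnn
    set t := (PySem.Chars.find s [v]).toNat with ht
    have hhead : s[t]? = some v := by
      have := (prefix_singleton_iff v (s.drop t)).mp hpre
      simpa [List.head?_drop] using this
    have htlen : t < s.length := by
      by_contra hle
      rw [List.getElem?_eq_none (by omega)] at hhead
      simp at hhead
    have h1 : ¬ t < k := by
      intro hlt
      have := hmin t hlt
      simp only [decide_eq_true_eq] at this
      have : s[t] ≠ v := fun he => this (by simpa using he)
      exact this (by have := hhead; rwa [List.getElem?_eq_getElem htlen, Option.some.injEq] at this)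
    have h2 : ¬ k < t := by
      intro hlt
      apply hfirst k hlt
      rw [prefix_singleton_iff, List.head?_drop, List.getElem?_eq_getElem hk]
      simpa using hpk
    have : t = k := by omega
    simp only []
    omega

-- A's loop over range(k, len s) returns the first vowel index ≥ k, as a one-element list
lemma loopA_range (s : List Char) (k : Nat) :
    loopA s (PySem.List.pyRange (k : Int) (s.length : Int) 1) =
      (match List.findIdx? pvIsV (s.drop k) with
       | none => []
       | some j => [((k + j : Nat) : Int)]) := by
  by_cases hk : k < s.length
  case neg =>
    rw [PySem.List.pyRange_one_eq_nil (by omega), List.drop_eq_nil_of_le (by omega)]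
    simp [loopA]
  case pos =>
    have : s.length - (k+1) < s.length - k := by omega
    rw [PySem.List.pyRange_one_cons (by omega : (k:Int) < (s.length:Int))]
    have hdrop : s.drop k = s[k] :: s.drop (k+1) := by
      rw [List.drop_eq_getElem_cons hk]
    rw [loopA]
    have hget : PySem.List.pyGet? s (k : Int) = some s[k] := by
      rw [PySem.List.pyGet?_natCast, List.getElem?_eq_getElem hk]
    rw [hget]
    dsimp only
    by_cases hp : pvIsV s[k] = true
    · rw [if_pos ((lowerChar_mem_iff _).mpr hp)]
      rw [hdrop, List.findIdx?_cons, if_pos hp]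
      simp
    · rw [if_neg (fun hm => hp ((lowerChar_mem_iff _).mp hm))]
      have hcast : ((k:Int) + 1) = ((k+1 : Nat) : Int) := by push_cast; ring
      rw [hcast, loopA_range s (k+1)]
      rw [hdrop, List.findIdx?_cons, if_neg (by simp [hp])]
      cases List.findIdx? pvIsV (s.drop (k+1)) with
      | none => simp
      | some j => simp; ring
termination_by s.length - k

-- B's min over the successful finds is the first vowel index
lemma minHits (s : List Char) :
    PySem.List.min? (((['a','e','i','o','u','A','E','I','O','U'] : List Char).map
        (fun v => PySem.Chars.find s [v])).filter (fun i => i ≠ -1)) (fun x => x) =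
      (List.findIdx? pvIsV s).map (fun j => (j : Int)) := by
  cases hf : List.findIdx? pvIsV s with
  | none =>
    rw [List.findIdx?_eq_none_iff] at hf
    have hall : ∀ v ∈ (['a','e','i','o','u','A','E','I','O','U'] : List Char),
        PySem.Chars.find s [v] = -1 := by
      intro v hv
      rw [find_singleton]
      have : List.findIdx? (fun c => c = v) s = none := by
        rw [List.findIdx?_eq_none_iff]
        intro c hc
        by_contra hcv
        have hcv' : c = v := by simpa using hcv
        have := hf c hc
        rw [hcv'] at this
        simp [pvIsV, hv] at this
      rw [this]
    have hnil : ((['a','e','i','o','u','A','E','I','O','U'] : List Char).map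
        (fun v => PySem.Chars.find s [v])).filter (fun i => i ≠ -1) = [] := by
      rw [List.filter_eq_nil_iff]
      intro a ha
      rcases List.mem_map.mp ha with ⟨v, hv, rfl⟩
      simp [hall v hv]
    rw [hnil]
    rfl
  | some k =>
    rcases List.findIdx?_eq_some_iff_getElem.mp hf with ⟨hk, hpk, hmin⟩
    have hc0V : s[k] ∈ (['a','e','i','o','u','A','E','I','O','U'] : List Char) := by
      simpa [pvIsV] using hpk
    have hfc0 : PySem.Chars.find s [s[k]] = (k : Int) := by
      rw [find_singleton]
      have : List.findIdx? (fun c => c = s[k]) s = some k := by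
        apply List.findIdx?_eq_some_iff_getElem.mpr
        refine ⟨hk, by simp, ?_⟩
        intro j hj
        simp only [decide_eq_true_eq]
        intro hje
        have : pvIsV s[j] = true := by rw [hje]; exact hpk
        exact absurd this (by simpa using hmin j hj)
      rw [this]
    have hmem : (k : Int) ∈ ((['a','e','i','o','u','A','E','I','O','U'] : List Char).map
        (fun v => PySem.Chars.find s [v])).filter (fun i => i ≠ -1) := by
      rw [List.mem_filter]
      constructor
      · exact List.mem_map.mpr ⟨s[k], hc0V, hfc0⟩
      · simp
    have hlb : ∀ x ∈ ((['a','e','i','o','u','A','E','I','O','U'] : List Char).map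
        (fun v => PySem.Chars.find s [v])).filter (fun i => i ≠ -1), (k : Int) ≤ x := by
      intro x hx
      rcases List.mem_filter.mp hx with ⟨hxm, hxne⟩
      rcases List.mem_map.mp hxm with ⟨v, hvV, rfl⟩
      rw [find_singleton] at hxne ⊢
      cases hfv : List.findIdx? (fun c => c = v) s with
      | none => rw [hfv] at hxne; simp at hxne
      | some k' =>
        rcases List.findIdx?_eq_some_iff_getElem.mp hfv with ⟨hk', hpk', _⟩
        have hv' : s[k'] = v := by simpa using hpk'
        have : pvIsV s[k'] = true := by simp [pvIsV, hv', hvV]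
        have hnk : ¬ k' < k := fun hlt => absurd this (by simpa using hmin k' hlt)
        show (k : Int) ≤ ((k' : Nat) : Int)
        omega
    cases hm : PySem.List.min? (((['a','e','i','o','u','A','E','I','O','U'] : List Char).map
        (fun v => PySem.Chars.find s [v])).filter (fun i => i ≠ -1)) (fun x => x) with
    | none =>
      rw [PySem.List.min?_eq_none_iff] at hm
      rw [hm] at hmem
      simp at hmem
    | some m =>
      have h1 := PySem.List.min?_isMin hm (k : Int) hmem
      have h2 := hlb m (PySem.List.min?_mem hm)
      have h1' : m ≤ (k : Int) := h1
      have h2' : (k : Int) ≤ m := h2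
      have hmk : m = (k : Int) := le_antisymm h1' h2'
      rw [hmk]
      rfl

-- ===== VERDICT (by name: the statement is the Claim_ definition above) =====
theorem replace_first_vowel_spec : Claim_equal_replace_first_vowel := by
  intro string _
  unfold Spec_replace_first_vowel replace_first_vowel replace_first_vowel_alt
  have hV : ("aeiouAEIOU".toList) = (['a','e','i','o','u','A','E','I','O','U'] : List Char) := by decide
  simp only [hV]
  rw [minHits]
  have h0 := loopA_range string.toList 0
  simp only [Nat.cast_zero, List.drop_zero, Nat.zero_add] at h0
  rw [h0]
  cases List.findIdx? pvIsV string.toList <;> simp
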